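-- pv_equiv track=rewrite | github.com/uvsq22100351/Projet-2048-S2 | 2048.py | Empiler_Haut
-- ===== SOURCE A (Python) =====
-- def Empiler_Haut(mat):
--     """Place les tuiles vers le haut"""
--     matrice2 = [[0]*4 for _ in range (4)]
--     for j in range (4):
--         pos = 0
--         for i in range (4):
--             if mat[i][j] != 0:
--                 matrice2[pos][j] = mat[i][j]
--                 pos+=1
--     mat = matrice2
--     return mat
-- ===== SOURCE B (Python) =====
-- def Empiler_Haut(mat):
--     # Stable sort each column by "is zero": Python's sort is stable, so the
--     # nonzero tiles keep their order and all zeros sink to the bottom.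
--     newcols = [sorted((mat[i][j] for i in range(4)), key=lambda v: v == 0)
--                for j in range(4)]
--     return [[newcols[j][i] for j in range(4)] for i in range(4)]
-- ===== Notes on version B (the rewrite author's own statement) =====
-- stated objective: alternative
-- what changed: A slides tiles up per column with a moving write-pointer 'pos' into a pre-zeroed matrix; B instead stably sorts each column by the key 'is zero' (stability keeps the nonzero tiles' order while zeros sink to the bottom) and rebuilds the rows.
import Mathlib
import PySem

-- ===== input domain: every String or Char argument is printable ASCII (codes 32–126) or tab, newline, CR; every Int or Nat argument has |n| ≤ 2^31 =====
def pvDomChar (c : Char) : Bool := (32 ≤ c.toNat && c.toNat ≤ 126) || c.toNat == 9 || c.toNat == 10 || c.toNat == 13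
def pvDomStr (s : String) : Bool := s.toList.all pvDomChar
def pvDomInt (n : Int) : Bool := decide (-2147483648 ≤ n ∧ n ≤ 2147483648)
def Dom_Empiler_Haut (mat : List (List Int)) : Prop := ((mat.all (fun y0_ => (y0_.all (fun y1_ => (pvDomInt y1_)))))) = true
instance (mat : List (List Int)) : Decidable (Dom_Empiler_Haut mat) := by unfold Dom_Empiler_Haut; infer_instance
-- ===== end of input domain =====

-- B replaces A's moving write-pointer 'pos' with a stable sort of each column by the key
-- "is zero" (stability keeps the nonzero order, zeros sink); equal return values, and
-- neither the Python B nor these ports mutate the input (A does not either).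

-- ===== PORT A =====
-- inner loop over i for one column j; state = (matrice2, pos).
-- mat[i][j] is read with pyGetD: under Pre_Empiler_Haut (i, j < 4 ≤ lengths) the access is
-- exactly Python's; matrice2[pos][j] writes use pySetD, always in range (pos ≤ i < 4, j < 4).
def pvColStep (mat : List (List Int)) (m2 : List (List Int)) (j : Int) : List (List Int) :=
  ((PySem.List.pyRange 0 4 1).foldl (fun (st : List (List Int) × Int) i =>
      let v := PySem.List.pyGetD (PySem.List.pyGetD mat i []) j 0
      if v ≠ 0 then
        (PySem.List.pySetD st.1 st.2 (PySem.List.pySetD (PySem.List.pyGetD st.1 st.2 []) j v), st.2 + 1)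
      else st)
    (m2, (0 : Int))).1

def Empiler_Haut (mat : List (List Int)) : List (List Int) :=
  (PySem.List.pyRange 0 4 1).foldl (pvColStep mat) (List.replicate 4 (List.replicate 4 0))

-- ===== PORT B =====
-- Python's key 'v == 0' yields booleans, which sort compares as False < True;
-- ported exactly as the Int key 'if v == 0 then 1 else 0'.
def Empiler_Haut_alt (mat : List (List Int)) : List (List Int) :=
  let newcols := (PySem.List.pyRange 0 4 1).map (fun j =>
    PySem.List.sorted
      ((PySem.List.pyRange 0 4 1).map (fun i => PySem.List.pyGetD (PySem.List.pyGetD mat i []) j 0))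
      (fun v => (if v == 0 then (1 : Int) else 0)) false)
  (PySem.List.pyRange 0 4 1).map (fun i =>
    (PySem.List.pyRange 0 4 1).map (fun j => PySem.List.pyGetD (PySem.List.pyGetD newcols j []) i 0))

-- ===== PRECONDITION & SPEC =====
-- Pre_ = exactly where Python's A returns: mat[i][j] for all i, j < 4 must exist
-- (otherwise A raises IndexError).
def Pre_Empiler_Haut (mat : List (List Int)) : Prop :=
  4 ≤ mat.length ∧ ∀ r ∈ mat.take 4, 4 ≤ r.length
instance (mat : List (List Int)) : Decidable (Pre_Empiler_Haut mat) := by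
  unfold Pre_Empiler_Haut; infer_instance

def pvWitness_Empiler_Haut : List (List Int) :=
  [[2, 0, 0, 2], [2, 0, 4, 0], [0, 0, 4, 0], [0, 2, 0, 2]]

def Spec_Empiler_Haut (mat : List (List Int)) (out : List (List Int)) : Prop := out = Empiler_Haut_alt mat
instance (mat : List (List Int)) (out : List (List Int)) : Decidable (Spec_Empiler_Haut mat out) := by unfold Spec_Empiler_Haut; infer_instance

-- ===== CLAIM (what is proved, stated in full; the proofs are below) =====
def Claim_equal_Empiler_Haut : Prop := ∀ (mat : List (List Int)), Dom_Empiler_Haut mat → Pre_Empiler_Haut mat → Spec_Empiler_Haut mat (Empiler_Haut mat)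

-- ===== LEMMAS AND PROOFS =====
theorem pvRange4 : PySem.List.pyRange 0 4 1 = [0, 1, 2, 3] := by decide

-- the compacted column: surviving values followed by zeros
def pkcol (x0 x1 x2 x3 : Int) : List Int :=
  let vals := [x0, x1, x2, x3].filter (fun v => v ≠ 0)
  vals ++ List.replicate (4 - vals.length) 0

-- B's stable sort by "is zero" of a 4-element column is exactly the compacted column.
theorem pvSorted_eq_pkcol (x0 x1 x2 x3 : Int) :
    PySem.List.sorted [x0, x1, x2, x3] (fun v => (if v == 0 then (1 : Int) else 0)) false
    = pkcol x0 x1 x2 x3 := by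
  by_cases h0 : x0 = 0 <;> by_cases h1 : x1 = 0 <;> by_cases h2 : x2 = 0 <;> by_cases h3 : x3 = 0 <;>
    simp [PySem.List.sorted_eq_foldl_insertBy, PySem.List.insertBy, pkcol, h0, h1, h2, h3,
      List.replicate]

-- One lemma per column j: A's inner loop on a state whose column j is still zero
-- rewrites exactly column j to the compacted column, leaving everything else unchanged.
theorem pvColStep_zero (x0 x1 x2 x3 : Int) (r0 r1 r2 r3 : List Int) (rest : List (List Int))
    (m01 m02 m03 m11 m12 m13 m21 m22 m23 m31 m32 m33 : Int) :
    pvColStep ((x0::r0)::(x1::r1)::(x2::r2)::(x3::r3)::rest)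
      [[0,m01,m02,m03],[0,m11,m12,m13],[0,m21,m22,m23],[0,m31,m32,m33]] 0
    = [[PySem.List.pyGetD (pkcol x0 x1 x2 x3) 0 0, m01, m02, m03],
       [PySem.List.pyGetD (pkcol x0 x1 x2 x3) 1 0, m11, m12, m13],
       [PySem.List.pyGetD (pkcol x0 x1 x2 x3) 2 0, m21, m22, m23],
       [PySem.List.pyGetD (pkcol x0 x1 x2 x3) 3 0, m31, m32, m33]] := by
  simp only [pvColStep, pvRange4, List.foldl_cons, List.foldl_nil, pkcol,
    PySem.List.pyGetD_ofNat', List.getD_cons_zero, List.getD_cons_succ, List.filter_cons,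
    List.filter_nil]
  norm_num
  split_ifs <;> rfl

theorem pvColStep_one (y0 y1 y2 y3 x0 x1 x2 x3 : Int) (r0 r1 r2 r3 : List Int) (rest : List (List Int))
    (m00 m02 m03 m10 m12 m13 m20 m22 m23 m30 m32 m33 : Int) :
    pvColStep ((y0::x0::r0)::(y1::x1::r1)::(y2::x2::r2)::(y3::x3::r3)::rest)
      [[m00,0,m02,m03],[m10,0,m12,m13],[m20,0,m22,m23],[m30,0,m32,m33]] 1
    = [[m00, PySem.List.pyGetD (pkcol x0 x1 x2 x3) 0 0, m02, m03],
       [m10, PySem.List.pyGetD (pkcol x0 x1 x2 x3) 1 0, m12, m13],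
       [m20, PySem.List.pyGetD (pkcol x0 x1 x2 x3) 2 0, m22, m23],
       [m30, PySem.List.pyGetD (pkcol x0 x1 x2 x3) 3 0, m32, m33]] := by
  simp only [pvColStep, pvRange4, List.foldl_cons, List.foldl_nil, pkcol,
    PySem.List.pyGetD_ofNat', List.getD_cons_zero, List.getD_cons_succ, List.filter_cons,
    List.filter_nil]
  norm_num
  split_ifs <;> rfl

theorem pvColStep_two (y0 y1 y2 y3 z0 z1 z2 z3 x0 x1 x2 x3 : Int) (r0 r1 r2 r3 : List Int) (rest : List (List Int))
    (m00 m01 m03 m10 m11 m13 m20 m21 m23 m30 m31 m33 : Int) :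
    pvColStep ((y0::z0::x0::r0)::(y1::z1::x1::r1)::(y2::z2::x2::r2)::(y3::z3::x3::r3)::rest)
      [[m00,m01,0,m03],[m10,m11,0,m13],[m20,m21,0,m23],[m30,m31,0,m33]] 2
    = [[m00, m01, PySem.List.pyGetD (pkcol x0 x1 x2 x3) 0 0, m03],
       [m10, m11, PySem.List.pyGetD (pkcol x0 x1 x2 x3) 1 0, m13],
       [m20, m21, PySem.List.pyGetD (pkcol x0 x1 x2 x3) 2 0, m23],
       [m30, m31, PySem.List.pyGetD (pkcol x0 x1 x2 x3) 3 0, m33]] := by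
  simp only [pvColStep, pvRange4, List.foldl_cons, List.foldl_nil, pkcol,
    PySem.List.pyGetD_ofNat', List.getD_cons_zero, List.getD_cons_succ, List.filter_cons,
    List.filter_nil]
  norm_num
  split_ifs <;> rfl

theorem pvColStep_three (y0 y1 y2 y3 z0 z1 z2 z3 w0 w1 w2 w3 x0 x1 x2 x3 : Int) (r0 r1 r2 r3 : List Int) (rest : List (List Int))
    (m00 m01 m02 m10 m11 m12 m20 m21 m22 m30 m31 m32 : Int) :
    pvColStep ((y0::z0::w0::x0::r0)::(y1::z1::w1::x1::r1)::(y2::z2::w2::x2::r2)::(y3::z3::w3::x3::r3)::rest)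
      [[m00,m01,m02,0],[m10,m11,m12,0],[m20,m21,m22,0],[m30,m31,m32,0]] 3
    = [[m00, m01, m02, PySem.List.pyGetD (pkcol x0 x1 x2 x3) 0 0],
       [m10, m11, m12, PySem.List.pyGetD (pkcol x0 x1 x2 x3) 1 0],
       [m20, m21, m22, PySem.List.pyGetD (pkcol x0 x1 x2 x3) 2 0],
       [m30, m31, m32, PySem.List.pyGetD (pkcol x0 x1 x2 x3) 3 0]] := by
  simp only [pvColStep, pvRange4, List.foldl_cons, List.foldl_nil, pkcol,
    PySem.List.pyGetD_ofNat', List.getD_cons_zero, List.getD_cons_succ, List.filter_cons,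
    List.filter_nil]
  norm_num
  split_ifs <;> rfl

-- B on a fully destructured matrix is the matrix of compacted-column entries.
theorem pvAlt_eval (a0 a1 a2 a3 b0 b1 b2 b3 c0 c1 c2 c3 d0 d1 d2 d3 : Int)
    (t0 t1 t2 t3 : List Int) (rest : List (List Int)) :
    Empiler_Haut_alt ((a0::a1::a2::a3::t0)::(b0::b1::b2::b3::t1)::(c0::c1::c2::c3::t2)::(d0::d1::d2::d3::t3)::rest)
    = [[PySem.List.pyGetD (pkcol a0 b0 c0 d0) 0 0, PySem.List.pyGetD (pkcol a1 b1 c1 d1) 0 0,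
        PySem.List.pyGetD (pkcol a2 b2 c2 d2) 0 0, PySem.List.pyGetD (pkcol a3 b3 c3 d3) 0 0],
       [PySem.List.pyGetD (pkcol a0 b0 c0 d0) 1 0, PySem.List.pyGetD (pkcol a1 b1 c1 d1) 1 0,
        PySem.List.pyGetD (pkcol a2 b2 c2 d2) 1 0, PySem.List.pyGetD (pkcol a3 b3 c3 d3) 1 0],
       [PySem.List.pyGetD (pkcol a0 b0 c0 d0) 2 0, PySem.List.pyGetD (pkcol a1 b1 c1 d1) 2 0,
        PySem.List.pyGetD (pkcol a2 b2 c2 d2) 2 0, PySem.List.pyGetD (pkcol a3 b3 c3 d3) 2 0],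
       [PySem.List.pyGetD (pkcol a0 b0 c0 d0) 3 0, PySem.List.pyGetD (pkcol a1 b1 c1 d1) 3 0,
        PySem.List.pyGetD (pkcol a2 b2 c2 d2) 3 0, PySem.List.pyGetD (pkcol a3 b3 c3 d3) 3 0]] := by
  simp only [Empiler_Haut_alt, pvRange4, List.map_cons, List.map_nil,
    PySem.List.pyGetD_ofNat', List.getD_cons_zero, List.getD_cons_succ, pvSorted_eq_pkcol]

-- ===== VERDICT (by name: the statement is the Claim_ definition above) =====
theorem Empiler_Haut_spec : Claim_equal_Empiler_Haut := by
  intro mat _ hpre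
  obtain ⟨hlen, hrows⟩ := hpre
  rcases mat with _ | ⟨r0, _ | ⟨r1, _ | ⟨r2, _ | ⟨r3, rest⟩⟩⟩⟩ <;> simp at hlen
  have h0 : 4 ≤ r0.length := hrows r0 (by simp)
  have h1 : 4 ≤ r1.length := hrows r1 (by simp)
  have h2 : 4 ≤ r2.length := hrows r2 (by simp)
  have h3 : 4 ≤ r3.length := hrows r3 (by simp)
  rcases r0 with _ | ⟨a0, _ | ⟨a1, _ | ⟨a2, _ | ⟨a3, t0⟩⟩⟩⟩ <;> simp at h0
  rcases r1 with _ | ⟨b0, _ | ⟨b1, _ | ⟨b2, _ | ⟨b3, t1⟩⟩⟩⟩ <;> simp at h1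
  rcases r2 with _ | ⟨c0, _ | ⟨c1, _ | ⟨c2, _ | ⟨c3, t2⟩⟩⟩⟩ <;> simp at h2
  rcases r3 with _ | ⟨d0, _ | ⟨d1, _ | ⟨d2, _ | ⟨d3, t3⟩⟩⟩⟩ <;> simp at h3
  show Empiler_Haut _ = Empiler_Haut_alt _
  rw [pvAlt_eval]
  show (PySem.List.pyRange 0 4 1).foldl _ _ = _
  rw [pvRange4]
  simp only [List.foldl_cons, List.foldl_nil, List.replicate]
  rw [pvColStep_zero, pvColStep_one, pvColStep_two, pvColStep_three]
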